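-- pv_equiv track=rewrite | github.com/Yningg/Cohesion_Evaluation | Cohesiveness_Calculation/General_function.py | build_subgraph
-- ===== SOURCE A (Python) =====
-- from collections import defaultdict
--
-- def build_subgraph(edge_stream, tadj_list, subgraph_nodes):
--     edge_substream = defaultdict(list)
--     tadj_sublist = defaultdict(list)
--     subgraph_nodes_set = set(subgraph_nodes)
--
--     for timestamp, edges in edge_stream.items():
--         for edge in edges:
--             u, v = edge[0], edge[1]
--             if u in subgraph_nodes_set and v in subgraph_nodes_set:
--                 edge_substream[timestamp].append(edge)
--                 if edge not in tadj_sublist[u]: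
--                     tadj_sublist[u].append(edge)
--                 if edge not in tadj_sublist[v]:
--                     tadj_sublist[v].append(edge)
--
--     return dict(edge_substream), dict(tadj_sublist)
-- ===== SOURCE B (Python) =====
-- def dedup_incident(all_kept, x):
--     out = []
--     for e in all_kept:
--         if (e[0] == x or e[1] == x) and e not in out:
--             out.append(e)
--     return out
--
-- def build_subgraph(edge_stream, tadj_list, subgraph_nodes):
--     nodes = set(subgraph_nodes)
--     edge_substream = {}
--     for t, edges in edge_stream.items():
--         kept = [e for e in edges if e[0] in nodes and e[1] in nodes]
--         if kept:
--             edge_substream[t] = kept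
--     all_kept = [e for kept in edge_substream.values() for e in kept]
--     order = []
--     for e in all_kept:
--         for x in (e[0], e[1]):
--             if x not in order:
--                 order.append(x)
--     tadj_sublist = {x: dedup_incident(all_kept, x) for x in order}
--     return edge_substream, tadj_sublist
-- ===== Notes on version B (the rewrite author's own statement) =====
-- stated objective: alternative
-- what changed: Replaces A's single interleaved pass (which appends each kept edge into per-node adjacency lists as it streams) by a staged, loop-inverted algorithm: first filter the edge stream per timestamp, then flatten the kept edges, compute the node key order, and build each node's adjacency list by an independent per-node scan of all kept edges (dedup_incident).
import Mathlib
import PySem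

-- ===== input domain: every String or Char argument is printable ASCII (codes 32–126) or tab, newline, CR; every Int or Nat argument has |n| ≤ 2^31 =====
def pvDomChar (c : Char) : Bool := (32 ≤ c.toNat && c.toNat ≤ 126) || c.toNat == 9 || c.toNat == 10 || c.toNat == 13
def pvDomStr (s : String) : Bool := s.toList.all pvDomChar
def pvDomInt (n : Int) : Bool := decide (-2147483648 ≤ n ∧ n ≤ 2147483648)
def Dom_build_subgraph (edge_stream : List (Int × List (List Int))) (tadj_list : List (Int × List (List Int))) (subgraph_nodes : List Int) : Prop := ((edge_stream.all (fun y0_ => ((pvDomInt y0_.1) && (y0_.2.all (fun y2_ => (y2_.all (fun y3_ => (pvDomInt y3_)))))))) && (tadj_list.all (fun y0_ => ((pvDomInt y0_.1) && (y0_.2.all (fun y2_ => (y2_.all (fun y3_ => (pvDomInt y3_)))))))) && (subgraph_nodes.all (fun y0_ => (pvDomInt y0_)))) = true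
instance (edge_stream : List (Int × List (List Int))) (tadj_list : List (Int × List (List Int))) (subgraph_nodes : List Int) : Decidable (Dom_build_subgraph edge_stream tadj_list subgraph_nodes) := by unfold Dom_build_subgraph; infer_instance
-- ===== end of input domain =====

-- B replaces A's single interleaved streaming pass by a staged, loop-inverted algorithm
-- (filter stream, flatten kept edges, then one independent scan of all kept edges per node);
-- objective: alternative decomposition, same results.

-- ===== PORT A =====
-- edge[i] on an edge of length ≥ 2 (Pre_ excludes shorter edges, where Python raises IndexError)
def pvGI (e : List Int) (i : Int) : Int := (PySem.List.pyGet? e i).getD 0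

-- literal transliteration of A: one pass over edge_stream.items(), appending to edge_substream[t]
-- and (with an ordered list-membership dedup) to tadj_sublist[u] / tadj_sublist[v] per kept edge.
def build_subgraph (edge_stream : List (Int × List (List Int))) (tadj_list : List (Int × List (List Int))) (subgraph_nodes : List Int) : (List (Int × List (List Int))) × (List (Int × List (List Int))) :=
  let nset : PySem.Set Int := PySem.Set.ofList subgraph_nodes
  let st := edge_stream.foldl
    (fun st p =>
      p.2.foldl
        (fun st e =>
          let u := pvGI e 0
          let v := pvGI e 1
          if PySem.Set.contains nset u && PySem.Set.contains nset v then
            let sub := st.1.insert p.1 (st.1.getD p.1 [] ++ [e])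
            let cu := st.2.getD u []
            let a1 := if e ∈ cu then st.2 else st.2.insert u (cu ++ [e])
            let cv := a1.getD v []
            let a2 := if e ∈ cv then a1 else a1.insert v (cv ++ [e])
            (sub, a2)
          else st)
        st)
    ((PySem.Dict.empty, PySem.Dict.empty) : PySem.Dict Int (List (List Int)) × PySem.Dict Int (List (List Int)))
  (st.1.items, st.2.items)

-- ===== PORT B =====
-- port of B's helper dedup_incident: one scan of all kept edges, keeping the edges incident to x,
-- deduplicated by ordered list membership.
def pvDedupIncident (all_kept : List (List Int)) (x : Int) : List (List Int) :=
  all_kept.foldl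
    (fun out e => if (pvGI e 0 = x ∨ pvGI e 1 = x) ∧ e ∉ out then out ++ [e] else out) []

-- literal transliteration of B: pass 1 filters each timestamp's edge list; then flatten the kept
-- edges, compute the node key order, and build the adjacency dict per node via pvDedupIncident.
def build_subgraph_alt (edge_stream : List (Int × List (List Int))) (tadj_list : List (Int × List (List Int))) (subgraph_nodes : List Int) : (List (Int × List (List Int))) × (List (Int × List (List Int))) :=
  let nset : PySem.Set Int := PySem.Set.ofList subgraph_nodes
  let sub := edge_stream.foldl
    (fun d p =>
      let kept := p.2.filter (fun e => PySem.Set.contains nset (pvGI e 0) && PySem.Set.contains nset (pvGI e 1))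
      if kept.isEmpty then d else d.insert p.1 kept)
    (PySem.Dict.empty : PySem.Dict Int (List (List Int)))
  let all_kept := (sub.items.map Prod.snd).flatten
  let order := all_kept.foldl
    (fun ord e => PySem.Set.add (PySem.Set.add ord (pvGI e 0)) (pvGI e 1)) ([] : PySem.Set Int)
  let adj := order.foldl
    (fun d x => d.insert x (pvDedupIncident all_kept x))
    (PySem.Dict.empty : PySem.Dict Int (List (List Int)))
  (sub.items, adj.items)

-- ===== PRECONDITION & SPEC =====
-- Pre_ excludes (a) edges with fewer than two entries, on which Python A raises IndexError, and
-- (b) assoc lists with duplicate timestamps, which a Python dict argument cannot represent.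
def Pre_build_subgraph (edge_stream : List (Int × List (List Int))) (tadj_list : List (Int × List (List Int))) (subgraph_nodes : List Int) : Prop :=
  ((edge_stream.map Prod.fst) == PySem.List.dedup (edge_stream.map Prod.fst)
    && edge_stream.all (fun p => p.2.all (fun e => decide (2 ≤ e.length)))) = true
instance (edge_stream : List (Int × List (List Int))) (tadj_list : List (Int × List (List Int))) (subgraph_nodes : List Int) : Decidable (Pre_build_subgraph edge_stream tadj_list subgraph_nodes) := by unfold Pre_build_subgraph; infer_instance

def pvWitness_build_subgraph : (List (Int × List (List Int))) × (List (Int × List (List Int))) × List Int :=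
  ([(1, [[1, 2], [1, 2], [2, 2]]), (3, [[2, 1], [0, 1]])], [], [1, 2])

def Spec_build_subgraph (edge_stream : List (Int × List (List Int))) (tadj_list : List (Int × List (List Int))) (subgraph_nodes : List Int) (out : (List (Int × List (List Int))) × (List (Int × List (List Int)))) : Prop := out = build_subgraph_alt edge_stream tadj_list subgraph_nodes
instance (edge_stream : List (Int × List (List Int))) (tadj_list : List (Int × List (List Int))) (subgraph_nodes : List Int) (out : (List (Int × List (List Int))) × (List (Int × List (List Int)))) : Decidable (Spec_build_subgraph edge_stream tadj_list subgraph_nodes out) := by unfold Spec_build_subgraph; infer_instance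

-- ===== CLAIM (what is proved, stated in full; the proofs are below) =====
def Claim_equal_build_subgraph : Prop := ∀ (edge_stream : List (Int × List (List Int))) (tadj_list : List (Int × List (List Int))) (subgraph_nodes : List Int), Dom_build_subgraph edge_stream tadj_list subgraph_nodes → Pre_build_subgraph edge_stream tadj_list subgraph_nodes → Spec_build_subgraph edge_stream tadj_list subgraph_nodes (build_subgraph edge_stream tadj_list subgraph_nodes)

-- ===== LEMMAS AND PROOFS =====

-- abbreviations used only by the proofs (definitionally equal to the ports' inline lambdas)
def keepE (nset : PySem.Set Int) (e : List Int) : Bool :=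
  PySem.Set.contains nset (pvGI e 0) && PySem.Set.contains nset (pvGI e 1)

def pvAddAdj (d : PySem.Dict Int (List (List Int))) (x : Int) (e : List Int) : PySem.Dict Int (List (List Int)) :=
  let cur := d.getD x []
  if e ∈ cur then d else d.insert x (cur ++ [e])

def adjStep (d : PySem.Dict Int (List (List Int))) (e : List Int) : PySem.Dict Int (List (List Int)) :=
  pvAddAdj (pvAddAdj d (pvGI e 0) e) (pvGI e 1) e

def dedupStep (x : Int) (out : List (List Int)) (e : List Int) : List (List Int) :=
  if (pvGI e 0 = x ∨ pvGI e 1 = x) ∧ e ∉ out then out ++ [e] else out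

def addEnds (ks : PySem.Set Int) (e : List Int) : PySem.Set Int :=
  PySem.Set.add (PySem.Set.add ks (pvGI e 0)) (pvGI e 1)

def stepA (nset : PySem.Set Int) (t : Int)
    (st : PySem.Dict Int (List (List Int)) × PySem.Dict Int (List (List Int))) (e : List Int) :
    PySem.Dict Int (List (List Int)) × PySem.Dict Int (List (List Int)) :=
  if keepE nset e then (st.1.insert t (st.1.getD t [] ++ [e]), adjStep st.2 e) else st

def stepB (nset : PySem.Set Int) (d : PySem.Dict Int (List (List Int)))
    (p : Int × List (List Int)) : PySem.Dict Int (List (List Int)) :=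
  if (p.2.filter (keepE nset)).isEmpty then d else d.insert p.1 (p.2.filter (keepE nset))

-- A's inner loop over one timestamp's edge list, decomposed
theorem innerA_decomp (nset : PySem.Set Int) (t : Int) (edges : List (List Int))
    (sub adj : PySem.Dict Int (List (List Int))) :
    edges.foldl (stepA nset t) (sub, adj)
      = (if (edges.filter (keepE nset)).isEmpty then sub
           else sub.insert t (sub.getD t [] ++ edges.filter (keepE nset)),
         (edges.filter (keepE nset)).foldl adjStep adj) := by
  induction edges generalizing sub adj with
  | nil => simp
  | cons e rest ih =>
    by_cases hk : keepE nset e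
    · simp only [List.foldl_cons, List.filter_cons, hk, if_pos, stepA]
      rw [ih]
      congr 1
      by_cases hrest : ((rest.filter (keepE nset)).isEmpty : Bool)
      · simp [List.isEmpty_iff.mp hrest]
      · simp only [hrest, List.isEmpty_cons, if_neg, Bool.false_eq_true, not_false_iff]
        rw [PySem.Dict.getD_insert_self, PySem.Dict.insert_insert_self, List.append_assoc]
        simp
    · simp only [List.foldl_cons, List.filter_cons, hk, stepA, Bool.false_eq_true, if_neg,
        not_false_iff]
      exact ih sub adj

-- the filtered edge stream, as B's first pass produces it
def keptList (nset : PySem.Set Int) (es : List (Int × List (List Int))) : List (Int × List (List Int)) :=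
  (es.filter (fun p => !(p.2.filter (keepE nset)).isEmpty)).map
    (fun p => (p.1, p.2.filter (keepE nset)))

-- B's first pass skips timestamps whose filtered edge list is empty: fold over the filter
theorem pass1_filter (nset : PySem.Set Int) (es : List (Int × List (List Int))) :
    ∀ d : PySem.Dict Int (List (List Int)),
      es.foldl (stepB nset) d
        = (es.filter (fun p => !(p.2.filter (keepE nset)).isEmpty)).foldl
            (fun d p => d.insert p.1 (p.2.filter (keepE nset))) d := by
  induction es with
  | nil => intro d; rfl
  | cons p rest ih =>
    intro d
    by_cases h : ((p.2.filter (keepE nset)).isEmpty : Bool) <;> simp [stepB, h, ih]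

-- A's outer loop, decomposed into a first-pass dict and the adjacency fold over the kept groups
theorem outerA_decomp (nset : PySem.Set Int) (es : List (Int × List (List Int)))
    (sub adj : PySem.Dict Int (List (List Int)))
    (hnd : (es.map Prod.fst).Nodup)
    (hfresh : ∀ p ∈ es, sub.contains p.1 = false) :
    es.foldl (fun st p => p.2.foldl (stepA nset p.1) st) (sub, adj)
      = (es.foldl (stepB nset) sub,
         (keptList nset es).foldl (fun a p => p.2.foldl adjStep a) adj) := by
  induction es generalizing sub adj with
  | nil => rfl
  | cons p rest ih =>
    simp only [List.foldl_cons]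
    rw [innerA_decomp]
    simp only [List.map_cons, List.nodup_cons] at hnd
    have hnd' : (rest.map Prod.fst).Nodup := hnd.2
    have hpfresh : sub.contains p.1 = false := hfresh p (List.mem_cons_self ..)
    have hne : ∀ q ∈ rest, q.1 ≠ p.1 := by
      intro q hq hEq
      exact hnd.1 (hEq ▸ List.mem_map_of_mem hq)
    by_cases hk : ((p.2.filter (keepE nset)).isEmpty : Bool)
    · have hkept : p.2.filter (keepE nset) = [] := List.isEmpty_iff.mp hk
      rw [if_pos hk, hkept]
      simp only [List.foldl_nil]
      rw [ih sub adj hnd' (fun q hq => hfresh q (List.mem_cons_of_mem _ hq))]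
      have hstep : stepB nset sub p = sub := by simp [stepB, hk]
      have hkl : keptList nset (p :: rest) = keptList nset rest := by
        simp [keptList, hk]
      rw [hstep, hkl]
    · rw [if_neg (by simp_all)]
      rw [show sub.getD p.1 [] = [] from PySem.Dict.getD_of_not_contains _ _ hpfresh, List.nil_append]
      have hfresh' : ∀ q ∈ rest, (sub.insert p.1 (p.2.filter (keepE nset))).contains q.1 = false := by
        intro q hq
        rw [PySem.Dict.contains_insert]
        simp [hne q hq, hfresh q (List.mem_cons_of_mem _ hq)]
      rw [ih _ _ hnd' hfresh']
      have hstep : stepB nset sub p = sub.insert p.1 (p.2.filter (keepE nset)) := by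
        simp [stepB, hk]
      have hkl : keptList nset (p :: rest)
          = (p.1, p.2.filter (keepE nset)) :: keptList nset rest := by
        simp [keptList, hk]
      rw [hstep, hkl, List.foldl_cons]

-- B's first pass from the empty dict lists exactly keptList
theorem pass1_items (nset : PySem.Set Int) (es : List (Int × List (List Int)))
    (hnd : (es.map Prod.fst).Nodup) :
    (es.foldl (stepB nset) (PySem.Dict.empty : PySem.Dict Int (List (List Int)))).items
      = keptList nset es := by
  rw [pass1_filter]
  have hsub : List.Sublist (es.filter (fun p => !(p.2.filter (keepE nset)).isEmpty)) es :=
    List.filter_sublist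
  rw [PySem.Dict.items_foldl_insert_fresh
        (l := es.filter (fun p => !(p.2.filter (keepE nset)).isEmpty))
        (k := Prod.fst) (v := fun p => p.2.filter (keepE nset))
        (d := PySem.Dict.empty)
        (fun a _ => PySem.Dict.contains_empty _)
        ((hsub.map Prod.fst).nodup hnd)]
  simp only [keptList]
  show PySem.Dict.empty.items ++ _ = _
  rw [show (PySem.Dict.empty : PySem.Dict Int (List (List Int))).items = [] from rfl,
    List.nil_append]

-- a grouped fold over the kept groups is the fold over the flattened kept edges
theorem grouped_foldl (l : List (Int × List (List Int))) (d : PySem.Dict Int (List (List Int))) :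
    l.foldl (fun a p => p.2.foldl adjStep a) d
      = ((l.map Prod.snd).flatten).foldl adjStep d := by
  induction l generalizing d with
  | nil => rfl
  | cons p rest ih => simp [List.foldl_append, ih]

-- one pvAddAdj, seen through getD
theorem pvAddAdj_getD (d : PySem.Dict Int (List (List Int))) (y x : Int) (e : List Int) :
    (pvAddAdj d y e).getD x []
      = if x = y then (if e ∈ d.getD y [] then d.getD y [] else d.getD y [] ++ [e])
        else d.getD x [] := by
  unfold pvAddAdj
  by_cases he : e ∈ d.getD y []
  · rw [if_pos he, if_pos he]
    by_cases hxy : x = y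
    · subst hxy; rw [if_pos rfl]
    · rw [if_neg hxy]
  · rw [if_neg he, if_neg he, PySem.Dict.getD_insert]

-- one pvAddAdj, seen through keys: it adds y (Python-set add) and nothing else
theorem pvAddAdj_keys (d : PySem.Dict Int (List (List Int))) (y : Int) (e : List Int) :
    (pvAddAdj d y e).keys = PySem.Set.add d.keys y := by
  unfold pvAddAdj
  by_cases he : e ∈ d.getD y []
  · have hc : d.contains y = true := by
      by_contra hc
      rw [PySem.Dict.getD_of_not_contains _ _ (by simpa using hc)] at he
      exact absurd he (List.not_mem_nil)
    rw [if_pos he, PySem.Set.add_of_mem ((PySem.Dict.contains_iff_mem_keys d y).mp hc)]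
  · rw [if_neg he]
    by_cases hc : d.contains y = true
    · rw [PySem.Dict.keys_insert_of_contains d _ hc,
        PySem.Set.add_of_mem ((PySem.Dict.contains_iff_mem_keys d y).mp hc)]
    · rw [PySem.Dict.keys_insert_of_not_contains d _ (by simpa using hc),
        PySem.Set.add_of_not_mem]
      intro hm
      exact hc ((PySem.Dict.contains_iff_mem_keys d y).mpr hm)

-- one adjStep, seen through getD: exactly B's per-node dedup step
theorem adjStep_getD (d : PySem.Dict Int (List (List Int))) (x : Int) (e : List Int) :
    (adjStep d e).getD x [] = dedupStep x (d.getD x []) e := by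
  unfold adjStep dedupStep
  simp only [pvAddAdj_getD]
  by_cases h0 : x = pvGI e 0 <;> by_cases h1 : x = pvGI e 1
  · -- x is both endpoints (self-loop)
    rw [if_pos h1, if_pos (h0 ▸ h1 ▸ rfl : pvGI e 1 = pvGI e 0), ← h0]
    by_cases he : e ∈ d.getD x []
    · simp [he]
    · simp [he]
  · -- x = first endpoint only
    rw [if_neg h1, if_pos h0, ← h0]
    by_cases he : e ∈ d.getD x [] <;> simp [he]
  · -- x = second endpoint only
    have hvu : ¬ pvGI e 1 = pvGI e 0 := fun h => h0 (h1.trans h)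
    rw [if_pos h1, if_neg hvu, ← h1]
    by_cases he : e ∈ d.getD x [] <;> simp [he]
  · -- x is not an endpoint
    rw [if_neg h1, if_neg h0]
    have hnc : ¬ ((pvGI e 0 = x ∨ pvGI e 1 = x) ∧ e ∉ d.getD x []) :=
      fun h => h.1.elim (fun h' => h0 h'.symm) (fun h' => h1 h'.symm)
    rw [if_neg hnc]

-- one adjStep, seen through keys: it set-adds the two endpoints in order
theorem adjStep_keys (d : PySem.Dict Int (List (List Int))) (e : List Int) :
    (adjStep d e).keys = addEnds d.keys e := by
  unfold adjStep addEnds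
  rw [pvAddAdj_keys, pvAddAdj_keys]

-- A's adjacency fold, seen through getD: B's dedup scan started at the current value
theorem adjFold_getD (L : List (List Int)) (d : PySem.Dict Int (List (List Int))) (x : Int) :
    (L.foldl adjStep d).getD x [] = L.foldl (dedupStep x) (d.getD x []) := by
  induction L generalizing d with
  | nil => rfl
  | cons e rest ih => simp only [List.foldl_cons, ih, adjStep_getD]

-- A's adjacency fold, seen through keys: B's key-order fold
theorem adjFold_keys (L : List (List Int)) (d : PySem.Dict Int (List (List Int))) :
    (L.foldl adjStep d).keys = L.foldl addEnds d.keys := by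
  induction L generalizing d with
  | nil => rfl
  | cons e rest ih => simp only [List.foldl_cons, ih, adjStep_keys]

-- the key-order fold keeps the key list duplicate-free
theorem addEnds_fold_nodup (L : List (List Int)) (ks : PySem.Set Int) (h : ks.Nodup) :
    (L.foldl addEnds ks).Nodup := by
  induction L generalizing ks with
  | nil => exact h
  | cons e rest ih =>
    exact ih _ (PySem.Set.nodup_add _ _ (PySem.Set.nodup_add _ _ h))

-- A's adjacency dict from empty, listed: key order × per-node dedup scans (= B's pass 2)
theorem adjFold_items (L : List (List Int)) :
    (L.foldl adjStep (PySem.Dict.empty : PySem.Dict Int (List (List Int)))).items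
      = (L.foldl addEnds ([] : PySem.Set Int)).map (fun x => (x, pvDedupIncident L x)) := by
  have hkeys : (L.foldl adjStep (PySem.Dict.empty : PySem.Dict Int (List (List Int)))).keys
      = L.foldl addEnds ([] : PySem.Set Int) := by
    rw [adjFold_keys]; rfl
  have hnd : (L.foldl adjStep (PySem.Dict.empty : PySem.Dict Int (List (List Int)))).keys.Nodup := by
    rw [hkeys]; exact addEnds_fold_nodup L [] List.nodup_nil
  rw [PySem.Dict.items_eq_map_keys _ hnd ([] : List (List Int)), hkeys]
  refine List.map_congr_left (fun x _ => ?_)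
  rw [adjFold_getD]
  rfl

-- B's pass 2: inserting fresh distinct keys lists exactly the order × dedup map
theorem pass2_items (L : List (List Int)) :
    ((L.foldl addEnds ([] : PySem.Set Int)).foldl
        (fun d x => d.insert x (pvDedupIncident L x))
        (PySem.Dict.empty : PySem.Dict Int (List (List Int)))).items
      = (L.foldl addEnds ([] : PySem.Set Int)).map (fun x => (x, pvDedupIncident L x)) := by
  have h := PySem.Dict.items_foldl_insert_fresh
      (l := L.foldl addEnds ([] : PySem.Set Int)) (k := fun x => x)
      (v := fun x => pvDedupIncident L x)
      (d := (PySem.Dict.empty : PySem.Dict Int (List (List Int))))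
      (fun a _ => PySem.Dict.contains_empty _)
      (by simpa using addEnds_fold_nodup L [] List.nodup_nil)
  simpa using h

-- ===== VERDICT (by name: the statement is the Claim_ definition above) =====
theorem build_subgraph_spec : Claim_equal_build_subgraph := by
  intro es ta ns _hdom hpre
  unfold Pre_build_subgraph at hpre
  simp only [Bool.and_eq_true, beq_iff_eq] at hpre
  have hnd : (es.map Prod.fst).Nodup := by
    rw [hpre.1]; exact PySem.List.nodup_dedup _
  unfold Spec_build_subgraph
  show build_subgraph es ta ns = build_subgraph_alt es ta ns
  have hA : build_subgraph es ta ns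
      = (let st := es.foldl (fun st p => p.2.foldl (stepA (PySem.Set.ofList ns) p.1) st)
             ((PySem.Dict.empty, PySem.Dict.empty) :
               PySem.Dict Int (List (List Int)) × PySem.Dict Int (List (List Int)))
         (st.1.items, st.2.items)) := rfl
  have hB : build_subgraph_alt es ta ns
      = (let sub := es.foldl (stepB (PySem.Set.ofList ns))
             (PySem.Dict.empty : PySem.Dict Int (List (List Int)))
         let all_kept := (sub.items.map Prod.snd).flatten
         let order := all_kept.foldl addEnds ([] : PySem.Set Int)
         let adj := order.foldl (fun d x => d.insert x (pvDedupIncident all_kept x))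
             (PySem.Dict.empty : PySem.Dict Int (List (List Int)))
         (sub.items, adj.items)) := rfl
  rw [hA, hB]
  simp only
  rw [outerA_decomp (PySem.Set.ofList ns) es PySem.Dict.empty PySem.Dict.empty hnd
        (fun p _ => PySem.Dict.contains_empty _)]
  rw [pass1_items (PySem.Set.ofList ns) es hnd]
  rw [grouped_foldl, adjFold_items, pass2_items]
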